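-- pv_equiv track=rewrite | github.com/canallee/PseudoMSA | utils/AAV.py | mask_inserts
-- ===== SOURCE A (Python) =====
-- def detokenize_mutation_seq(tokens, upper=False):
--     assert len(tokens) == 29, \
--         'AAV should have 29 pairs of subs and insert, but currently have '+str(len(tokens))
--     def parse_no_gap(token):
--         if token == '_':
--             return ''
--         else:
--             return token
--     aa_str = ''
--     for i in range(len(tokens)):
--         if i == 0:
--             if upper:
--                 aa_str += parse_no_gap(tokens[i][1])
--             else:
--                 # no substitution, only (potentially) insertion
--                 aa_str += parse_no_gap(tokens[i][1].lower())
--         else: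
--             aa_str += parse_no_gap(tokens[i][0])
--             if upper:
--                 aa_str += parse_no_gap(tokens[i][1])
--             else:
--                 aa_str += parse_no_gap(tokens[i][1].lower())
--     return aa_str
--
-- def mask_inserts(start_tokens):
--     mutant_seqs_list = []
--     mutant_seqs_upper_list = []
--     mask_site_list = []
--     for i in range(len(start_tokens)):
--         for j in range(2):
--             token_to_mutate = start_tokens.copy()
--             if (i, j) != (0, 0) and start_tokens[i][j] == '_':
--                 token = list(token_to_mutate[i])
--                 token[j] = '<mask>'
--                 token_to_mutate[i] = tuple(token)
--                 mutant_seqs_list.append(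
--                     detokenize_mutation_seq(token_to_mutate))
--                 mutant_seqs_upper_list.append(
--                     detokenize_mutation_seq(token_to_mutate, upper=True))
--                 mask_site_list.append((i, j))
--     return mutant_seqs_list, mutant_seqs_upper_list, mask_site_list
-- ===== SOURCE B (Python) =====
-- def mask_inserts(start_tokens):
--     # Build the flat per-field contribution tables once (lower-case and
--     # upper-case), then produce each variant by splicing '<mask>' at the
--     # slot's offset using precomputed prefix/suffix strings.
--     low = []
--     up = []
--     for i, (a, b) in enumerate(start_tokens):
--         la = '' if (i == 0 or a == '_') else a
--         tb = b.lower()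
--         low.append(la)
--         low.append('' if tb == '_' else tb)
--         up.append(la)
--         up.append('' if b == '_' else b)
--
--     def prefixes(parts):
--         out = []
--         s = ''
--         for x in parts:
--             out.append(s)
--             s += x
--         return out
--
--     def suffixes(parts):
--         out = []
--         t = ''
--         for x in reversed(parts):
--             t = x + t
--             out.append(t)
--         out.reverse()
--         return out
--
--     pre_low, pre_up = prefixes(low), prefixes(up)
--     suf_low, suf_up = suffixes(low), suffixes(up)
--
--     seqs, seqs_up, sites = [], [], []
--     for i, (a, b) in enumerate(start_tokens):
--         if i > 0 and a == '_':
--             k = 2 * i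
--             seqs.append(pre_low[k] + '<mask>' + suf_low[k])
--             seqs_up.append(pre_up[k] + '<mask>' + suf_up[k])
--             sites.append((i, 0))
--         if b == '_':
--             k = 2 * i + 1
--             seqs.append(pre_low[k] + '<mask>' + suf_low[k])
--             seqs_up.append(pre_up[k] + '<mask>' + suf_up[k])
--             sites.append((i, 1))
--     return seqs, seqs_up, sites
-- ===== Notes on version B (the rewrite author's own statement) =====
-- stated objective: alternative
-- what changed: Instead of re-detokenizing the entire 29-token list for every maskable slot, B detokenizes once into flat per-field contribution tables with precomputed prefix/suffix join strings and builds each variant by splicing '<mask>' at the slot's offset.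
import Mathlib
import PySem

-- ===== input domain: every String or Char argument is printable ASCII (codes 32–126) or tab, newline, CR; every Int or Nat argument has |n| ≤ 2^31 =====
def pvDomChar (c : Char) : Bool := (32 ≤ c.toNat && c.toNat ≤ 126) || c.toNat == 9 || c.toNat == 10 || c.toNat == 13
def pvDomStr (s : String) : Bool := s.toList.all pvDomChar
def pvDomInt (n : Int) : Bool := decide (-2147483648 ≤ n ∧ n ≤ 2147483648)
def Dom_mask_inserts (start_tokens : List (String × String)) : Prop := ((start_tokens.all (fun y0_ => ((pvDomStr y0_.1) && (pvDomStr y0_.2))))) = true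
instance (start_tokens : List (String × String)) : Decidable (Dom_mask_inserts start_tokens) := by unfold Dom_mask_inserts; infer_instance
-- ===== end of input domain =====

-- B precomputes the flat lower/upper contribution tables and prefix/suffix strings once
-- and builds each variant by splicing '<mask>' at the slot's offset, instead of
-- re-detokenizing the whole token list for every slot (objective: alternative).

-- ===== PORT A =====
def parse_no_gap (token : String) : String :=
  if token = "_" then "" else token

-- Python's `assert len(tokens) == 29` raises AssertionError; those calls are excluded
-- by Pre_mask_inserts, so the assert is not modelled here.
def detokenize_mutation_seq (tokens : List (String × String)) (upper : Bool) : String :=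
  (PySem.List.pyRange 0 (tokens.length : Int) 1).foldl
    (fun aa_str i =>
      let tk := PySem.List.pyGetD tokens i ("", "")
      if i = 0 then
        if upper then aa_str ++ parse_no_gap tk.2
        else aa_str ++ parse_no_gap (PySem.Str.lower tk.2)
      else
        let aa_str2 := aa_str ++ parse_no_gap tk.1
        if upper then aa_str2 ++ parse_no_gap tk.2
        else aa_str2 ++ parse_no_gap (PySem.Str.lower tk.2))
    ""

def mask_inserts (start_tokens : List (String × String)) : List String × List String × (List (Int × Int)) :=
  (PySem.List.pyRange 0 (start_tokens.length : Int) 1).foldl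
    (fun acc i =>
      (PySem.List.pyRange 0 2 1).foldl
        (fun (acc : List String × List String × List (Int × Int)) j =>
          let tk := PySem.List.pyGetD start_tokens i ("", "")
          if ¬(i = 0 ∧ j = 0) ∧ (if j = 0 then tk.1 else tk.2) = "_" then
            let tk' := if j = 0 then ("<mask>", tk.2) else (tk.1, "<mask>")
            let st' := PySem.List.pySetD start_tokens i tk'
            (acc.1 ++ [detokenize_mutation_seq st' false],
             acc.2.1 ++ [detokenize_mutation_seq st' true],
             acc.2.2 ++ [(i, j)])
          else acc)
        acc)
    ([], [], [])

-- ===== PORT B =====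
def pvPrefixes (parts : List String) : List String :=
  (parts.foldl (fun (acc : List String × String) x => (acc.1 ++ [acc.2], acc.2 ++ x)) ([], "")).1

def pvSuffixes (parts : List String) : List String :=
  ((parts.reverse.foldl (fun (acc : List String × String) x => (acc.1 ++ [x ++ acc.2], x ++ acc.2)) ([], "")).1).reverse

def mask_inserts_alt (start_tokens : List (String × String)) : List String × List String × (List (Int × Int)) :=
  let lu := (PySem.List.enumerate start_tokens 0).foldl
    (fun (acc : List String × List String) p =>
      let la := if p.1 = 0 ∨ p.2.1 = "_" then "" else p.2.1
      let tb := PySem.Str.lower p.2.2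
      (acc.1 ++ [la, if tb = "_" then "" else tb],
       acc.2 ++ [la, if p.2.2 = "_" then "" else p.2.2]))
    ([], [])
  let preLow := pvPrefixes lu.1
  let preUp := pvPrefixes lu.2
  let sufLow := pvSuffixes lu.1
  let sufUp := pvSuffixes lu.2
  (PySem.List.enumerate start_tokens 0).foldl
    (fun (acc : List String × List String × List (Int × Int)) p =>
      let acc2 :=
        if 0 < p.1 ∧ p.2.1 = "_" then
          let k := 2 * p.1
          (acc.1 ++ [PySem.List.pyGetD preLow k "" ++ "<mask>" ++ PySem.List.pyGetD sufLow k ""],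
           acc.2.1 ++ [PySem.List.pyGetD preUp k "" ++ "<mask>" ++ PySem.List.pyGetD sufUp k ""],
           acc.2.2 ++ [(p.1, 0)])
        else acc
      if p.2.2 = "_" then
        let k := 2 * p.1 + 1
        (acc2.1 ++ [PySem.List.pyGetD preLow k "" ++ "<mask>" ++ PySem.List.pyGetD sufLow k ""],
         acc2.2.1 ++ [PySem.List.pyGetD preUp k "" ++ "<mask>" ++ PySem.List.pyGetD sufUp k ""],
         acc2.2.2 ++ [(p.1, 1)])
      else acc2)
    ([], [], [])

-- ===== PRECONDITION & SPEC =====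
-- Pre_ excludes exactly the inputs on which Python A raises AssertionError
-- (a maskable '_' slot exists but the list does not have the 29 pairs the assert demands).
def Pre_mask_inserts (start_tokens : List (String × String)) : Prop :=
  start_tokens.length = 29 ∨
    ((∀ t ∈ start_tokens.take 1, t.2 ≠ "_") ∧
     (∀ t ∈ start_tokens.drop 1, t.1 ≠ "_" ∧ t.2 ≠ "_"))
instance (start_tokens : List (String × String)) : Decidable (Pre_mask_inserts start_tokens) := by
  unfold Pre_mask_inserts; infer_instance
def pvWitness_mask_inserts : (List (String × String)) := [("A", "b"), ("C", "d")]

def Spec_mask_inserts (start_tokens : List (String × String)) (out : List String × List String × (List (Int × Int))) : Prop := out = mask_inserts_alt start_tokens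
instance (start_tokens : List (String × String)) (out : List String × List String × (List (Int × Int))) : Decidable (Spec_mask_inserts start_tokens out) := by unfold Spec_mask_inserts; infer_instance

-- ===== CLAIM (what is proved, stated in full; the proofs are below) =====
def Claim_equal_mask_inserts : Prop := ∀ (start_tokens : List (String × String)), Dom_mask_inserts start_tokens → Pre_mask_inserts start_tokens → Spec_mask_inserts start_tokens (mask_inserts start_tokens)

-- ===== LEMMAS AND PROOFS =====

-- join of a list of strings
def sj : List String → String
  | [] => ""
  | x :: l => x ++ sj l

theorem sj_append (a b : List String) : sj (a ++ b) = sj a ++ sj b := by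
  induction a with
  | nil => simp [sj]
  | cons x xs ih => simp [sj, ih, String.append_assoc]

-- the flat contribution tables B builds (one lower-case and one upper-case entry pair per token)
def lowEntry (p : Int × (String × String)) : List String :=
  [if p.1 = 0 ∨ p.2.1 = "_" then "" else p.2.1,
   if PySem.Str.lower p.2.2 = "_" then "" else PySem.Str.lower p.2.2]

def upEntry (p : Int × (String × String)) : List String :=
  [if p.1 = 0 ∨ p.2.1 = "_" then "" else p.2.1,
   if p.2.2 = "_" then "" else p.2.2]

def lows (st : List (String × String)) : List String :=
  (PySem.List.enumerate st 0).flatMap lowEntry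
def ups (st : List (String × String)) : List String :=
  (PySem.List.enumerate st 0).flatMap upEntry

theorem foldl_pair_append {α : Type} (l : List α) (g h : α → List String)
    (x y : List String) :
    l.foldl (fun acc p => (acc.1 ++ g p, acc.2 ++ h p)) (x, y)
      = (x ++ l.flatMap g, y ++ l.flatMap h) := by
  induction l generalizing x y with
  | nil => simp
  | cons a as ih => simp [ih]

theorem lu_eq (st : List (String × String)) :
    (PySem.List.enumerate st 0).foldl
      (fun (acc : List String × List String) p =>
        let la := if p.1 = 0 ∨ p.2.1 = "_" then "" else p.2.1
        let tb := PySem.Str.lower p.2.2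
        (acc.1 ++ [la, if tb = "_" then "" else tb],
         acc.2 ++ [la, if p.2.2 = "_" then "" else p.2.2]))
      ([], [])
      = (lows st, ups st) := by
  have := foldl_pair_append (PySem.List.enumerate st 0) lowEntry upEntry [] []
  simpa [lowEntry, upEntry, lows, ups] using this

theorem prefixes_spec (parts : List String) (acc : List String) (s : String) :
    parts.foldl (fun (a : List String × String) x => (a.1 ++ [a.2], a.2 ++ x)) (acc, s)
      = (acc ++ (List.range parts.length).map (fun k => s ++ sj (parts.take k)), s ++ sj parts) := by
  induction parts generalizing acc s with
  | nil => simp [sj]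
  | cons x xs ih =>
      simp only [List.foldl_cons, ih, List.length_cons, List.range_succ_eq_map,
        List.map_cons, List.map_map]
      simp [sj, Function.comp, String.append_assoc]

theorem pvPrefixes_eq (parts : List String) :
    pvPrefixes parts = (List.range parts.length).map (fun k => sj (parts.take k)) := by
  unfold pvPrefixes
  rw [prefixes_spec]
  simp

theorem suffixes_spec (parts : List String) :
    parts.foldr (fun x (a : List String × String) => (a.1 ++ [x ++ a.2], x ++ a.2)) ([], "")
      = (((List.range parts.length).map (fun k => sj (parts.drop k))).reverse, sj parts) := by
  induction parts with
  | nil => simp [sj]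
  | cons x xs ih =>
      simp only [List.foldr_cons, ih, List.length_cons, List.range_succ_eq_map,
        List.map_cons, List.map_map]
      simp [sj, Function.comp]

theorem pvSuffixes_eq (parts : List String) :
    pvSuffixes parts = (List.range parts.length).map (fun k => sj (parts.drop k)) := by
  unfold pvSuffixes
  rw [List.foldl_reverse]
  rw [suffixes_spec]
  simp

theorem foldl2_append (l : List (String × String)) (g h : String × String → String) (init : String) :
    l.foldl (fun acc p => (acc ++ g p) ++ h p) init
      = init ++ sj (l.flatMap (fun p => [g p, h p])) := by
  induction l generalizing init with
  | nil => simp [sj]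
  | cons a as ih =>
      simp only [List.foldl_cons]
      rw [ih]
      simp [sj, String.append_assoc]

theorem enum_low_pos (ys : List (String × String)) (s : Int) (hs : 1 ≤ s) :
    (PySem.List.enumerate ys s).flatMap lowEntry
      = ys.flatMap (fun t => [parse_no_gap t.1, parse_no_gap (PySem.Str.lower t.2)]) := by
  induction ys generalizing s with
  | nil => simp [PySem.List.enumerate_nil]
  | cons t ts ih =>
      rw [PySem.List.enumerate_cons]
      simp only [List.flatMap_cons, ih (s + 1) (by omega)]
      have hs0 : ¬ s = 0 := by omega
      simp [lowEntry, parse_no_gap, hs0]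

theorem enum_up_pos (ys : List (String × String)) (s : Int) (hs : 1 ≤ s) :
    (PySem.List.enumerate ys s).flatMap upEntry
      = ys.flatMap (fun t => [parse_no_gap t.1, parse_no_gap t.2]) := by
  induction ys generalizing s with
  | nil => simp [PySem.List.enumerate_nil]
  | cons t ts ih =>
      rw [PySem.List.enumerate_cons]
      simp only [List.flatMap_cons, ih (s + 1) (by omega)]
      have hs0 : ¬ s = 0 := by omega
      simp [upEntry, parse_no_gap, hs0]

theorem detok_false (st : List (String × String)) :
    detokenize_mutation_seq st false = sj (lows st) := by
  cases st with
  | nil =>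
      unfold detokenize_mutation_seq lows
      rw [PySem.List.pyRange_one_eq_nil (by simp)]
      simp [PySem.List.enumerate_nil, sj]
  | cons t rest =>
      unfold detokenize_mutation_seq
      rw [PySem.List.pyRange_one_cons (a := 0) (by exact_mod_cast Nat.succ_pos rest.length)]
      simp only [List.foldl_cons, Bool.false_eq_true, if_false, zero_add,
        PySem.List.pyGetD_ofNat', List.getD_cons_zero, if_true]
      rw [PySem.List.foldl_congr_mem _ _
        (fun aa i => (aa ++ parse_no_gap (PySem.List.pyGetD (t :: rest) i ("", "")).1)
          ++ parse_no_gap (PySem.Str.lower (PySem.List.pyGetD (t :: rest) i ("", "")).2)) _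
        (by
          intro acc x hx
          have hx1 : 1 ≤ x := (PySem.List.mem_pyRange_one.mp hx).1
          have hx0 : ¬ x = 0 := by omega
          simp [hx0])]
      rw [show ((t :: rest).length : Int) = PySem.List.len (t :: rest) from by
        rw [PySem.List.len_eq]]
      rw [PySem.List.foldl_pyRange_pyGetD (t :: rest) ("", "")
        (fun acc p => (acc ++ parse_no_gap p.1) ++ parse_no_gap (PySem.Str.lower p.2)) _
        (by norm_num)]
      simp only [Int.toNat_one, List.drop_succ_cons, List.drop_zero]
      rw [foldl2_append]
      unfold lows
      rw [PySem.List.enumerate_cons]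
      simp only [List.flatMap_cons, zero_add, enum_low_pos rest 1 le_rfl]
      simp [lowEntry, parse_no_gap, sj]

theorem detok_true (st : List (String × String)) :
    detokenize_mutation_seq st true = sj (ups st) := by
  cases st with
  | nil =>
      unfold detokenize_mutation_seq ups
      rw [PySem.List.pyRange_one_eq_nil (by simp)]
      simp [PySem.List.enumerate_nil, sj]
  | cons t rest =>
      unfold detokenize_mutation_seq
      rw [PySem.List.pyRange_one_cons (a := 0) (by exact_mod_cast Nat.succ_pos rest.length)]
      simp only [List.foldl_cons, zero_add,
        PySem.List.pyGetD_ofNat', List.getD_cons_zero, if_true]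
      rw [PySem.List.foldl_congr_mem _ _
        (fun aa i => (aa ++ parse_no_gap (PySem.List.pyGetD (t :: rest) i ("", "")).1)
          ++ parse_no_gap (PySem.List.pyGetD (t :: rest) i ("", "")).2) _
        (by
          intro acc x hx
          have hx1 : 1 ≤ x := (PySem.List.mem_pyRange_one.mp hx).1
          have hx0 : ¬ x = 0 := by omega
          simp [hx0])]
      rw [show ((t :: rest).length : Int) = PySem.List.len (t :: rest) from by
        rw [PySem.List.len_eq]]
      rw [PySem.List.foldl_pyRange_pyGetD (t :: rest) ("", "")
        (fun acc p => (acc ++ parse_no_gap p.1) ++ parse_no_gap p.2) _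
        (by norm_num)]
      simp only [Int.toNat_one, List.drop_succ_cons, List.drop_zero]
      rw [foldl2_append]
      unfold ups
      rw [PySem.List.enumerate_cons]
      simp only [List.flatMap_cons, zero_add, enum_up_pos rest 1 le_rfl]
      simp [upEntry, parse_no_gap, sj]

theorem enum_low_length (ys : List (String × String)) (s : Int) :
    ((PySem.List.enumerate ys s).flatMap lowEntry).length = 2 * ys.length := by
  induction ys generalizing s with
  | nil => simp [PySem.List.enumerate_nil]
  | cons t ts ih =>
      rw [PySem.List.enumerate_cons]
      simp only [List.flatMap_cons, List.length_append, ih (s + 1)]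
      simp [lowEntry]
      omega

theorem enum_up_length (ys : List (String × String)) (s : Int) :
    ((PySem.List.enumerate ys s).flatMap upEntry).length = 2 * ys.length := by
  induction ys generalizing s with
  | nil => simp [PySem.List.enumerate_nil]
  | cons t ts ih =>
      rw [PySem.List.enumerate_cons]
      simp only [List.flatMap_cons, List.length_append, ih (s + 1)]
      simp [upEntry]
      omega

theorem lows_length (st : List (String × String)) : (lows st).length = 2 * st.length :=
  enum_low_length st 0

theorem ups_length (st : List (String × String)) : (ups st).length = 2 * st.length :=
  enum_up_length st 0


-- splitting the contribution table at token m (and the same split after masking token m)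
theorem enum_flat_split (E : Int × (String × String) → List String)
    (hE : ∀ (ys : List (String × String)) (s : Int),
      ((PySem.List.enumerate ys s).flatMap E).length = 2 * ys.length)
    (st : List (String × String)) (m : Nat) (hm : m < st.length) (tk' : String × String) :
    ∃ P S, P.length = 2 * m ∧
      (PySem.List.enumerate st 0).flatMap E = P ++ (E (↑m, st[m]) ++ S) ∧
      (PySem.List.enumerate (st.set m tk') 0).flatMap E = P ++ (E (↑m, tk') ++ S) := by
  refine ⟨(PySem.List.enumerate (st.take m) 0).flatMap E,
          (PySem.List.enumerate (st.drop (m + 1)) (↑m + 1)).flatMap E, ?_, ?_, ?_⟩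
  · rw [hE]; simp [Nat.min_eq_left (le_of_lt hm)]
  · conv_lhs => rw [show st = st.take m ++ st.drop m from (List.take_append_drop m st).symm,
      List.drop_eq_getElem_cons hm]
    rw [PySem.List.enumerate_append, PySem.List.enumerate_cons]
    simp [Nat.min_eq_left (le_of_lt hm)]
  · rw [List.set_eq_take_append_cons_drop, if_pos hm]
    rw [PySem.List.enumerate_append, PySem.List.enumerate_cons]
    simp [Nat.min_eq_left (le_of_lt hm)]

theorem splice_low_j0 (st : List (String × String)) (m : Nat) (hm : m < st.length)
    (hm0 : 0 < m) (ha : st[m].1 = "_") :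
    sj (lows (st.set m ("<mask>", st[m].2)))
      = sj ((lows st).take (2 * m)) ++ ("<mask>" ++ sj ((lows st).drop (2 * m))) := by
  obtain ⟨P, S, hP, h1, h2⟩ := enum_flat_split lowEntry enum_low_length st m hm ("<mask>", st[m].2)
  have hmask : ¬(((m : Nat) : Int) = 0 ∨ "<mask>" = "_") := by
    rintro (h | h); · omega
    · exact absurd h (by decide)
  have e0 : lowEntry (↑m, st[m])
      = ["", if PySem.Str.lower st[m].2 = "_" then "" else PySem.Str.lower st[m].2] := by
    simp [lowEntry, ha]
  have e1 : lowEntry (↑m, ("<mask>", st[m].2))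
      = ["<mask>", if PySem.Str.lower st[m].2 = "_" then "" else PySem.Str.lower st[m].2] := by
    simp only [lowEntry]
    rw [if_neg hmask]
  unfold lows
  rw [h2, e1, h1, e0]
  rw [List.take_append, List.drop_append, List.take_of_length_le (by omega),
    List.drop_eq_nil_of_le (by omega), hP, Nat.sub_self]
  simp [sj_append, sj]

theorem splice_low_j1 (st : List (String × String)) (m : Nat) (hm : m < st.length)
    (hb : st[m].2 = "_") :
    sj (lows (st.set m (st[m].1, "<mask>")))
      = sj ((lows st).take (2 * m + 1)) ++ ("<mask>" ++ sj ((lows st).drop (2 * m + 1))) := by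
  obtain ⟨P, S, hP, h1, h2⟩ := enum_flat_split lowEntry enum_low_length st m hm (st[m].1, "<mask>")
  have e0 : lowEntry (↑m, st[m])
      = [if (↑m : Int) = 0 ∨ st[m].1 = "_" then "" else st[m].1, ""] := by
    simp [lowEntry, hb, show PySem.Str.lower "_" = "_" from by decide]
  have e1 : lowEntry (↑m, (st[m].1, "<mask>"))
      = [if (↑m : Int) = 0 ∨ st[m].1 = "_" then "" else st[m].1, "<mask>"] := by
    simp only [lowEntry]
    rw [if_neg (by decide : ¬ PySem.Str.lower "<mask>" = "_")]
    rw [show PySem.Str.lower "<mask>" = "<mask>" from by decide]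
  unfold lows
  rw [h2, e1, h1, e0]
  rw [List.take_append, List.drop_append, List.take_of_length_le (by omega),
    List.drop_eq_nil_of_le (by omega), hP,
    show 2 * m + 1 - (2 * m) = 1 from by omega]
  simp [sj_append, sj, String.append_assoc]

theorem splice_up_j0 (st : List (String × String)) (m : Nat) (hm : m < st.length)
    (hm0 : 0 < m) (ha : st[m].1 = "_") :
    sj (ups (st.set m ("<mask>", st[m].2)))
      = sj ((ups st).take (2 * m)) ++ ("<mask>" ++ sj ((ups st).drop (2 * m))) := by
  obtain ⟨P, S, hP, h1, h2⟩ := enum_flat_split upEntry enum_up_length st m hm ("<mask>", st[m].2)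
  have hmask : ¬(((m : Nat) : Int) = 0 ∨ "<mask>" = "_") := by
    rintro (h | h); · omega
    · exact absurd h (by decide)
  have e0 : upEntry (↑m, st[m]) = ["", if st[m].2 = "_" then "" else st[m].2] := by
    simp [upEntry, ha]
  have e1 : upEntry (↑m, ("<mask>", st[m].2))
      = ["<mask>", if st[m].2 = "_" then "" else st[m].2] := by
    simp only [upEntry]
    rw [if_neg hmask]
  unfold ups
  rw [h2, e1, h1, e0]
  rw [List.take_append, List.drop_append, List.take_of_length_le (by omega),
    List.drop_eq_nil_of_le (by omega), hP, Nat.sub_self]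
  simp [sj_append, sj]

theorem splice_up_j1 (st : List (String × String)) (m : Nat) (hm : m < st.length)
    (hb : st[m].2 = "_") :
    sj (ups (st.set m (st[m].1, "<mask>")))
      = sj ((ups st).take (2 * m + 1)) ++ ("<mask>" ++ sj ((ups st).drop (2 * m + 1))) := by
  obtain ⟨P, S, hP, h1, h2⟩ := enum_flat_split upEntry enum_up_length st m hm (st[m].1, "<mask>")
  have e0 : upEntry (↑m, st[m])
      = [if (↑m : Int) = 0 ∨ st[m].1 = "_" then "" else st[m].1, ""] := by
    simp [upEntry, hb]
  have e1 : upEntry (↑m, (st[m].1, "<mask>"))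
      = [if (↑m : Int) = 0 ∨ st[m].1 = "_" then "" else st[m].1, "<mask>"] := by
    simp only [upEntry]
    rw [if_neg (by decide : ¬ ("<mask>" : String) = "_")]
  unfold ups
  rw [h2, e1, h1, e0]
  rw [List.take_append, List.drop_append, List.take_of_length_le (by omega),
    List.drop_eq_nil_of_le (by omega), hP,
    show 2 * m + 1 - (2 * m) = 1 from by omega]
  simp [sj_append, sj, String.append_assoc]

-- per-slot values: A's full re-detokenization equals B's splice at the slot offset
theorem valLow_j0 (st : List (String × String)) (m : Nat) (hm : m < st.length)
    (hm0 : 0 < m) (ha : st[m].1 = "_") :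
    detokenize_mutation_seq (PySem.List.pySetD st ↑m ("<mask>", st[m].2)) false
      = PySem.List.pyGetD (pvPrefixes (lows st)) (2 * (↑m : Int)) "" ++ "<mask>"
        ++ PySem.List.pyGetD (pvSuffixes (lows st)) (2 * (↑m : Int)) "" := by
  have hset : PySem.List.pySetD st ↑m ("<mask>", st[m].2) = st.set m ("<mask>", st[m].2) := by
    simp [PySem.List.pySetD, PySem.List.pySet?_natCast _ _ _ hm]
  have hlen : (lows st).length = 2 * st.length := lows_length st
  have hcast : (2 * ((m : Nat) : Int)) = ((2 * m : Nat) : Int) := by push_cast; ring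
  rw [hset, detok_false, splice_low_j0 st m hm hm0 ha, hcast,
    PySem.List.pyGetD_natCast, PySem.List.pyGetD_natCast, pvPrefixes_eq, pvSuffixes_eq,
    PySem.List.getD_map_range _ _ _ _ (by omega), PySem.List.getD_map_range _ _ _ _ (by omega)]
  simp [String.append_assoc]

theorem valLow_j1 (st : List (String × String)) (m : Nat) (hm : m < st.length)
    (hb : st[m].2 = "_") :
    detokenize_mutation_seq (PySem.List.pySetD st ↑m (st[m].1, "<mask>")) false
      = PySem.List.pyGetD (pvPrefixes (lows st)) (2 * (↑m : Int) + 1) "" ++ "<mask>"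
        ++ PySem.List.pyGetD (pvSuffixes (lows st)) (2 * (↑m : Int) + 1) "" := by
  have hset : PySem.List.pySetD st ↑m (st[m].1, "<mask>") = st.set m (st[m].1, "<mask>") := by
    simp [PySem.List.pySetD, PySem.List.pySet?_natCast _ _ _ hm]
  have hlen : (lows st).length = 2 * st.length := lows_length st
  have hcast : (2 * ((m : Nat) : Int) + 1) = ((2 * m + 1 : Nat) : Int) := by push_cast; ring
  rw [hset, detok_false, splice_low_j1 st m hm hb, hcast,
    PySem.List.pyGetD_natCast, PySem.List.pyGetD_natCast, pvPrefixes_eq, pvSuffixes_eq,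
    PySem.List.getD_map_range _ _ _ _ (by omega), PySem.List.getD_map_range _ _ _ _ (by omega)]
  simp [String.append_assoc]

theorem valUp_j0 (st : List (String × String)) (m : Nat) (hm : m < st.length)
    (hm0 : 0 < m) (ha : st[m].1 = "_") :
    detokenize_mutation_seq (PySem.List.pySetD st ↑m ("<mask>", st[m].2)) true
      = PySem.List.pyGetD (pvPrefixes (ups st)) (2 * (↑m : Int)) "" ++ "<mask>"
        ++ PySem.List.pyGetD (pvSuffixes (ups st)) (2 * (↑m : Int)) "" := by
  have hset : PySem.List.pySetD st ↑m ("<mask>", st[m].2) = st.set m ("<mask>", st[m].2) := by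
    simp [PySem.List.pySetD, PySem.List.pySet?_natCast _ _ _ hm]
  have hlen : (ups st).length = 2 * st.length := ups_length st
  have hcast : (2 * ((m : Nat) : Int)) = ((2 * m : Nat) : Int) := by push_cast; ring
  rw [hset, detok_true, splice_up_j0 st m hm hm0 ha, hcast,
    PySem.List.pyGetD_natCast, PySem.List.pyGetD_natCast, pvPrefixes_eq, pvSuffixes_eq,
    PySem.List.getD_map_range _ _ _ _ (by omega), PySem.List.getD_map_range _ _ _ _ (by omega)]
  simp [String.append_assoc]

theorem valUp_j1 (st : List (String × String)) (m : Nat) (hm : m < st.length)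
    (hb : st[m].2 = "_") :
    detokenize_mutation_seq (PySem.List.pySetD st ↑m (st[m].1, "<mask>")) true
      = PySem.List.pyGetD (pvPrefixes (ups st)) (2 * (↑m : Int) + 1) "" ++ "<mask>"
        ++ PySem.List.pyGetD (pvSuffixes (ups st)) (2 * (↑m : Int) + 1) "" := by
  have hset : PySem.List.pySetD st ↑m (st[m].1, "<mask>") = st.set m (st[m].1, "<mask>") := by
    simp [PySem.List.pySetD, PySem.List.pySet?_natCast _ _ _ hm]
  have hlen : (ups st).length = 2 * st.length := ups_length st
  have hcast : (2 * ((m : Nat) : Int) + 1) = ((2 * m + 1 : Nat) : Int) := by push_cast; ring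
  rw [hset, detok_true, splice_up_j1 st m hm hb, hcast,
    PySem.List.pyGetD_natCast, PySem.List.pyGetD_natCast, pvPrefixes_eq, pvSuffixes_eq,
    PySem.List.getD_map_range _ _ _ _ (by omega), PySem.List.getD_map_range _ _ _ _ (by omega)]
  simp [String.append_assoc]

-- both outer loops append per-slot contributions; fold them into flatMaps
theorem foldl_triple {A B C D : Type} (l : List A)
    (f : (List B × List C × List D) → A → (List B × List C × List D))
    (u : A → List B) (v : A → List C) (w : A → List D)
    (hf : ∀ acc x, f acc x = (acc.1 ++ u x, acc.2.1 ++ v x, acc.2.2 ++ w x))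
    (acc : List B × List C × List D) :
    l.foldl f acc = (acc.1 ++ l.flatMap u, acc.2.1 ++ l.flatMap v, acc.2.2 ++ l.flatMap w) := by
  induction l generalizing acc with
  | nil => simp
  | cons a as ih => rw [List.foldl_cons, hf, ih]; simp

def uA (st : List (String × String)) (i : Int) : List String :=
  (if ¬ i = 0 ∧ (PySem.List.pyGetD st i ("", "")).1 = "_"
    then [detokenize_mutation_seq
      (PySem.List.pySetD st i ("<mask>", (PySem.List.pyGetD st i ("", "")).2)) false] else [])
  ++ (if (PySem.List.pyGetD st i ("", "")).2 = "_"
    then [detokenize_mutation_seq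
      (PySem.List.pySetD st i ((PySem.List.pyGetD st i ("", "")).1, "<mask>")) false] else [])

def vA (st : List (String × String)) (i : Int) : List String :=
  (if ¬ i = 0 ∧ (PySem.List.pyGetD st i ("", "")).1 = "_"
    then [detokenize_mutation_seq
      (PySem.List.pySetD st i ("<mask>", (PySem.List.pyGetD st i ("", "")).2)) true] else [])
  ++ (if (PySem.List.pyGetD st i ("", "")).2 = "_"
    then [detokenize_mutation_seq
      (PySem.List.pySetD st i ((PySem.List.pyGetD st i ("", "")).1, "<mask>")) true] else [])

def wA (st : List (String × String)) (i : Int) : List (Int × Int) :=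
  (if ¬ i = 0 ∧ (PySem.List.pyGetD st i ("", "")).1 = "_" then [(i, 0)] else [])
  ++ (if (PySem.List.pyGetD st i ("", "")).2 = "_" then [(i, 1)] else [])

def uB (st : List (String × String)) (p : Int × (String × String)) : List String :=
  (if 0 < p.1 ∧ p.2.1 = "_"
    then [PySem.List.pyGetD (pvPrefixes (lows st)) (2 * p.1) "" ++ "<mask>"
      ++ PySem.List.pyGetD (pvSuffixes (lows st)) (2 * p.1) ""] else [])
  ++ (if p.2.2 = "_"
    then [PySem.List.pyGetD (pvPrefixes (lows st)) (2 * p.1 + 1) "" ++ "<mask>"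
      ++ PySem.List.pyGetD (pvSuffixes (lows st)) (2 * p.1 + 1) ""] else [])

def vB (st : List (String × String)) (p : Int × (String × String)) : List String :=
  (if 0 < p.1 ∧ p.2.1 = "_"
    then [PySem.List.pyGetD (pvPrefixes (ups st)) (2 * p.1) "" ++ "<mask>"
      ++ PySem.List.pyGetD (pvSuffixes (ups st)) (2 * p.1) ""] else [])
  ++ (if p.2.2 = "_"
    then [PySem.List.pyGetD (pvPrefixes (ups st)) (2 * p.1 + 1) "" ++ "<mask>"
      ++ PySem.List.pyGetD (pvSuffixes (ups st)) (2 * p.1 + 1) ""] else [])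

def wB (p : Int × (String × String)) : List (Int × Int) :=
  (if 0 < p.1 ∧ p.2.1 = "_" then [(p.1, 0)] else [])
  ++ (if p.2.2 = "_" then [(p.1, 1)] else [])

theorem maskA_eq (st : List (String × String)) :
    mask_inserts st
      = ((PySem.List.pyRange 0 (st.length : Int) 1).flatMap (uA st),
         (PySem.List.pyRange 0 (st.length : Int) 1).flatMap (vA st),
         (PySem.List.pyRange 0 (st.length : Int) 1).flatMap (wA st)) := by
  unfold mask_inserts
  rw [foldl_triple _ _ (uA st) (vA st) (wA st) ?_ ([], [], [])]
  · simp
  · intro acc i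
    rw [show PySem.List.pyRange 0 2 1 = [0, 1] from by decide]
    simp only [List.foldl_cons, List.foldl_nil]
    by_cases h0 : ¬ i = 0 ∧ (PySem.List.pyGetD st i ("", "")).1 = "_" <;>
      by_cases h1 : (PySem.List.pyGetD st i ("", "")).2 = "_" <;>
      simp [uA, vA, wA, h0, h1]

theorem maskB_eq (st : List (String × String)) :
    mask_inserts_alt st
      = ((PySem.List.enumerate st 0).flatMap (uB st),
         (PySem.List.enumerate st 0).flatMap (vB st),
         (PySem.List.enumerate st 0).flatMap wB) := by
  unfold mask_inserts_alt
  simp only []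
  rw [lu_eq]
  rw [foldl_triple _ _ (uB st) (vB st) wB ?_ ([], [], [])]
  · simp
  · intro acc p
    by_cases c0 : 0 < p.1 ∧ p.2.1 = "_" <;> by_cases c1 : p.2.2 = "_" <;>
      simp [uB, vB, wB, c0, c1]

theorem uAB (st : List (String × String)) (m : Nat) (hm : m < st.length) :
    uA st ↑m = uB st (↑m, PySem.List.pyGetD st ↑m ("", "")) := by
  have hget : PySem.List.pyGetD st (↑m) ("", "") = st[m] := by
    rw [PySem.List.pyGetD_natCast]
    exact List.getD_eq_getElem st ("", "") hm
  have hiff : (¬ ((m : Nat) : Int) = 0) ↔ (0 < ((m : Nat) : Int)) := by omega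
  simp only [uA, uB, hget]
  simp only [hiff]
  by_cases hc : 0 < ((m : Nat) : Int) ∧ st[m].1 = "_"
  · by_cases hb : st[m].2 = "_"
    · simp only [if_pos hc, if_pos hb]
      rw [valLow_j0 st m hm (by exact_mod_cast hc.1) hc.2, valLow_j1 st m hm hb]
    · simp only [if_pos hc, if_neg hb]
      rw [valLow_j0 st m hm (by exact_mod_cast hc.1) hc.2]
  · by_cases hb : st[m].2 = "_"
    · simp only [if_neg hc, if_pos hb]
      rw [valLow_j1 st m hm hb]
    · simp only [if_neg hc, if_neg hb]

theorem vAB (st : List (String × String)) (m : Nat) (hm : m < st.length) :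
    vA st ↑m = vB st (↑m, PySem.List.pyGetD st ↑m ("", "")) := by
  have hget : PySem.List.pyGetD st (↑m) ("", "") = st[m] := by
    rw [PySem.List.pyGetD_natCast]
    exact List.getD_eq_getElem st ("", "") hm
  have hiff : (¬ ((m : Nat) : Int) = 0) ↔ (0 < ((m : Nat) : Int)) := by omega
  simp only [vA, vB, hget]
  simp only [hiff]
  by_cases hc : 0 < ((m : Nat) : Int) ∧ st[m].1 = "_"
  · by_cases hb : st[m].2 = "_"
    · simp only [if_pos hc, if_pos hb]
      rw [valUp_j0 st m hm (by exact_mod_cast hc.1) hc.2, valUp_j1 st m hm hb]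
    · simp only [if_pos hc, if_neg hb]
      rw [valUp_j0 st m hm (by exact_mod_cast hc.1) hc.2]
  · by_cases hb : st[m].2 = "_"
    · simp only [if_neg hc, if_pos hb]
      rw [valUp_j1 st m hm hb]
    · simp only [if_neg hc, if_neg hb]

theorem wAB (st : List (String × String)) (m : Nat) (hm : m < st.length) :
    wA st ↑m = wB (↑m, PySem.List.pyGetD st ↑m ("", "")) := by
  have hget : PySem.List.pyGetD st (↑m) ("", "") = st[m] := by
    rw [PySem.List.pyGetD_natCast]
    exact List.getD_eq_getElem st ("", "") hm
  have hiff : (¬ ((m : Nat) : Int) = 0) ↔ (0 < ((m : Nat) : Int)) := by omega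
  simp only [wA, wB, hget]
  simp only [hiff]

-- ===== VERDICT (by name: the statement is the Claim_ definition above) =====
set_option maxHeartbeats 1000000 in
theorem mask_inserts_spec : Claim_equal_mask_inserts := by
  intro st _ _
  unfold Spec_mask_inserts
  rw [maskA_eq, maskB_eq]
  rw [PySem.List.enumerate_eq_map_pyRange st ("", "")]
  rw [List.flatMap_map, List.flatMap_map, List.flatMap_map]
  simp only [PySem.List.len_eq]
  refine congrArg₂ Prod.mk ?_ (congrArg₂ Prod.mk ?_ ?_)
  · refine List.flatMap_congr (fun i hi => ?_)
    obtain ⟨h0, hlt⟩ := PySem.List.mem_pyRange_one.mp hi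
    have him : i = ((i.toNat : Nat) : Int) := by omega
    have hm : i.toNat < st.length := by omega
    rw [him]
    exact uAB st i.toNat hm
  · refine List.flatMap_congr (fun i hi => ?_)
    obtain ⟨h0, hlt⟩ := PySem.List.mem_pyRange_one.mp hi
    have him : i = ((i.toNat : Nat) : Int) := by omega
    have hm : i.toNat < st.length := by omega
    rw [him]
    exact vAB st i.toNat hm
  · refine List.flatMap_congr (fun i hi => ?_)
    obtain ⟨h0, hlt⟩ := PySem.List.mem_pyRange_one.mp hi
    have him : i = ((i.toNat : Nat) : Int) := by omega
    have hm : i.toNat < st.length := by omega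
    rw [him]
    exact wAB st i.toNat hm
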